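-- pv_equiv track=rewrite | github.com/pyodolski/smart-farm-service | routes/greenhouse.py | find_col_groups
-- ===== SOURCE A (Python) =====
-- def find_contiguous_segments(line):
--     segments = []
--     start = 0
--     val = line[0]
--     for i in range(1, len(line)):
--         if line[i] != val:
--             segments.append((start, i - 1, val))
--             start = i
--             val = line[i]
--     segments.append((start, len(line) - 1, val))
--     return segments
--
-- def find_col_groups(grid):
--     groups = []
--     for col_idx in range(len(grid[0])):
--         col = [row[col_idx] for row in grid]
--         segments = find_contiguous_segments(col)
--         for start, end, val in segments:
--             if end > start:
--                 groups.append((start, col_idx, end, val))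
--     return groups
-- ===== SOURCE B (Python) =====
-- def find_col_groups(grid):
--     ncols = len(grid[0])
--     # per-column state: (run_start, run_val, buffer of closed segments)
--     state = [(0, v, []) for v in grid[0]]
--     for i in range(1, len(grid)):
--         row = grid[i]
--         for c in range(ncols):
--             s, val, buf = state[c]
--             v = row[c]
--             if v != val:
--                 if i - 1 > s:
--                     buf.append((s, i - 1, val))
--                 state[c] = (i, v, buf)
--     last = len(grid) - 1
--     groups = []
--     for c, (s, val, buf) in enumerate(state):
--         for bs, be, bv in buf:
--             groups.append((bs, c, be, bv))
--         if last > s: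
--             groups.append((s, c, last, val))
--     return groups
-- ===== Notes on version B (the rewrite author's own statement) =====
-- stated objective: alternative
-- what changed: Replaces A's column-by-column transposition (building each column list, then a segment pass per column) with a single row-major pass that keeps per-column run state and per-column result buffers, flattened in column order at the end.
import Mathlib
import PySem

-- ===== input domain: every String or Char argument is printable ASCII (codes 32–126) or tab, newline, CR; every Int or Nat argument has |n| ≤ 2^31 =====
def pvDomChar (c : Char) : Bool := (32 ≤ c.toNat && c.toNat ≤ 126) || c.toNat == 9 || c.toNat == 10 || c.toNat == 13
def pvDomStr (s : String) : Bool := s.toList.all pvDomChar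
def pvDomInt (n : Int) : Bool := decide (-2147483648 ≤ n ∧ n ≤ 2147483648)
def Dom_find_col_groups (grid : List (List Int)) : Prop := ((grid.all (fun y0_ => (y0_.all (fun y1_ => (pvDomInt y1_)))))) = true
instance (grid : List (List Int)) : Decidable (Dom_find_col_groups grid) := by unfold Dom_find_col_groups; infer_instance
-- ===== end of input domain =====

-- B replaces A's column-by-column transposition with one row-major pass over per-column
-- run state and per-column buffers (objective: alternative decomposition, same cost).

-- ===== PORT A =====
-- loop body of find_contiguous_segments, extracted as a helper
def pvStepA (i : Int) (v : Int) (acc : List (Int × Int × Int) × Int × Int) :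
    List (Int × Int × Int) × Int × Int :=
  if v ≠ acc.2.2 then (acc.1 ++ [(acc.2.1, i - 1, acc.2.2)], i, v) else acc

def find_contiguous_segments (line : List Int) : List (Int × Int × Int) :=
  let r := (PySem.List.pyRange 1 (line.length : Int) 1).foldl
    (fun acc i => pvStepA i (PySem.List.pyGetD line i 0) acc)
    (([] : List (Int × Int × Int)), (0 : Int), PySem.List.pyGetD line 0 0)
  r.1 ++ [(r.2.1, (line.length : Int) - 1, r.2.2)]

def find_col_groups (grid : List (List Int)) : List (Int × Int × Int × Int) :=
  (PySem.List.pyRange 0 (((PySem.List.pyGetD grid 0 ([] : List Int)).length : Nat) : Int) 1).foldl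
    (fun groups c =>
      (find_contiguous_segments (grid.map (fun row => PySem.List.pyGetD row c 0))).foldl
        (fun g t => if t.2.1 > t.1 then g ++ [(t.1, c, t.2.1, t.2.2)] else g) groups)
    []

-- ===== PORT B =====
-- per-column run-state update: state = (run_start, run_val, buffer of closed segments)
def pvStep (i : Int) (st : Int × Int × List (Int × Int × Int)) (v : Int) :
    Int × Int × List (Int × Int × Int) :=
  if v ≠ st.2.1 then
    (i, v, st.2.2 ++ (if i - 1 > st.1 then [(st.1, i - 1, st.2.1)] else []))
  else st

-- inner 'for c in range(ncols)' pass of one row: update every column's state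
def pvRowStep (i : Int) (row : List Int) (st : List (Int × Int × List (Int × Int × Int))) :
    List (Int × Int × List (Int × Int × Int)) :=
  List.zipWith (pvStep i) st row

def find_col_groups_alt (grid : List (List Int)) : List (Int × Int × Int × Int) :=
  let state := (PySem.List.pyRange 1 (grid.length : Int) 1).foldl
    (fun st i => pvRowStep i (PySem.List.pyGetD grid i ([] : List Int)) st)
    ((PySem.List.pyGetD grid 0 ([] : List Int)).map
      (fun v => ((0 : Int), v, ([] : List (Int × Int × Int)))))
  let last : Int := (grid.length : Int) - 1
  (PySem.List.enumerate state 0).foldl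
    (fun groups p =>
      groups ++ (p.2.2.2.map (fun b => (b.1, p.1, b.2.1, b.2.2)) ++
        (if last > p.2.1 then [(p.2.1, p.1, last, p.2.2.1)] else [])))
    []

-- ===== PRECONDITION & SPEC =====
-- Pre_ excludes exactly the inputs where Python A raises: the empty grid (grid[0] → IndexError)
-- and grids with a row shorter than the first row (row[col_idx] → IndexError).
def Pre_find_col_groups (grid : List (List Int)) : Prop :=
  grid ≠ [] ∧ ∀ row ∈ grid, (grid.headD []).length ≤ row.length
instance (grid : List (List Int)) : Decidable (Pre_find_col_groups grid) := by
  unfold Pre_find_col_groups; infer_instance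
def pvWitness_find_col_groups : List (List Int) := [[1, 1, 2], [1, 2, 2], [1, 2, 2]]

def Spec_find_col_groups (grid : List (List Int)) (out : List (Int × Int × Int × Int)) : Prop := out = find_col_groups_alt grid
instance (grid : List (List Int)) (out : List (Int × Int × Int × Int)) : Decidable (Spec_find_col_groups grid out) := by unfold Spec_find_col_groups; infer_instance

-- ===== CLAIM (what is proved, stated in full; the proofs are below) =====
def Claim_equal_find_col_groups : Prop := ∀ (grid : List (List Int)), Dom_find_col_groups grid → Pre_find_col_groups grid → Spec_find_col_groups grid (find_col_groups grid)

-- ===== LEMMAS AND PROOFS =====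

-- an index loop 'for i in range(a, len(xs)): … xs[i] …' whose body uses i, as a recursion on the suffix
def pvIdxFold {α σ : Type} (g : Int → α → σ → σ) : Int → σ → List α → σ
  | _, st, [] => st
  | i, st, x :: xs => pvIdxFold g (i + 1) (g i x st) xs

theorem pvIdxFold_pyRange {α σ : Type} (g : Int → α → σ → σ) (d : α) :
    ∀ (suf pre : List α) (init : σ),
      (PySem.List.pyRange (pre.length : Int) (((pre ++ suf).length : Nat) : Int) 1).foldl
          (fun st i => g i (PySem.List.pyGetD (pre ++ suf) i d) st) init
        = pvIdxFold g (pre.length : Int) init suf := by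
  intro suf
  induction suf with
  | nil =>
      intro pre init
      simp [pvIdxFold, PySem.List.pyRange_one_eq_nil (le_refl _)]
  | cons x xs ih =>
      intro pre init
      have hlt : (pre.length : Int) < (((pre ++ x :: xs).length : Nat) : Int) := by
        simp
      rw [PySem.List.pyRange_one_cons hlt, List.foldl_cons]
      have hget : PySem.List.pyGetD (pre ++ x :: xs) (pre.length : Int) d = x := by
        simp [List.getD_eq_getElem?_getD]
      rw [hget]
      show _ = pvIdxFold g ((pre.length : Int) + 1) (g (pre.length : Int) x init) xs
      have h2 := ih (pre ++ [x]) (g (pre.length : Int) x init)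
      simpa [List.append_assoc, add_comm] using h2

theorem pvIdxFold_pyRange_tail {α σ : Type} (g : Int → α → σ → σ) (d : α) (x : α)
    (t : List α) (init : σ) :
    (PySem.List.pyRange 1 (((x :: t).length : Nat) : Int) 1).foldl
        (fun st i => g i (PySem.List.pyGetD (x :: t) i d) st) init
      = pvIdxFold g 1 init t := by
  simpa using pvIdxFold_pyRange g d t [x] init

theorem pvColFold_eq : ∀ (vs : List Int) (i s val : Int) (segs : List (Int × Int × Int)),
    pvIdxFold (fun j v st => pvStep j st v) i
        (s, val, segs.filter (fun t => decide (t.2.1 > t.1))) vs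
      = ((pvIdxFold pvStepA i (segs, s, val) vs).2.1,
         (pvIdxFold pvStepA i (segs, s, val) vs).2.2,
         (pvIdxFold pvStepA i (segs, s, val) vs).1.filter (fun t => decide (t.2.1 > t.1))) := by
  intro vs
  induction vs with
  | nil => intro i s val segs; simp [pvIdxFold]
  | cons v vs ih =>
      intro i s val segs
      by_cases hv : v = val
      · simpa [pvIdxFold, pvStep, pvStepA, hv] using ih (i + 1) s val segs
      · have hA : pvStepA i v (segs, s, val) = (segs ++ [(s, i - 1, val)], i, v) := by
          simp [pvStepA, hv]
        have hB : pvStep i (s, val, segs.filter (fun t => decide (t.2.1 > t.1))) v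
            = (i, v, (segs ++ [(s, i - 1, val)]).filter (fun t => decide (t.2.1 > t.1))) := by
          simp [pvStep, hv, List.filter_append, List.filter_singleton]
        rw [pvIdxFold, pvIdxFold, hA, hB]
        exact ih (i + 1) i v (segs ++ [(s, i - 1, val)])

theorem pvZipFold : ∀ (rows : List (List Int)) (i : Int)
    (st : List (Int × Int × List (Int × Int × Int))),
    (∀ r ∈ rows, st.length ≤ r.length) →
    pvIdxFold pvRowStep i st rows
      = (List.range st.length).map (fun c =>
          pvIdxFold (fun j v s => pvStep j s v) i
            (st.getD c ((0 : Int), (0 : Int), ([] : List (Int × Int × Int))))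
            (rows.map (fun r => r.getD c 0))) := by
  intro rows
  induction rows with
  | nil =>
      intro i st h
      refine List.ext_getElem (by simp [pvIdxFold]) ?_
      intro c h1 h2
      simp [pvIdxFold, List.getD_eq_getElem?_getD, List.getElem?_eq_getElem (by simpa using h2)]
  | cons r rows ih =>
      intro i st h
      have hr : st.length ≤ r.length := h r (List.mem_cons_self ..)
      have hlen : (pvRowStep i r st).length = st.length := by
        simp [pvRowStep, Nat.min_eq_left hr]
      rw [pvIdxFold, ih (i + 1) _ (by intro r' hr'; rw [hlen]; exact h r' (List.mem_cons_of_mem _ hr')), hlen]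
      refine List.map_congr_left ?_
      intro c hc
      have hc' : c < st.length := List.mem_range.mp hc
      have hst : (pvRowStep i r st).getD c ((0 : Int), (0 : Int), ([] : List (Int × Int × Int)))
          = pvStep i (st.getD c ((0 : Int), (0 : Int), ([] : List (Int × Int × Int)))) (r.getD c 0) := by
        have hcr : c < r.length := lt_of_lt_of_le hc' hr
        simp [pvRowStep, List.getD_eq_getElem?_getD, List.getElem?_eq_getElem (l := st) hc',
          List.getElem?_eq_getElem (l := r) hcr,
          List.getElem?_eq_getElem (l := List.zipWith (pvStep i) st r) (by simpa [Nat.min_eq_left hr] using hc')]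
      rw [hst]
      simp [pvIdxFold]

theorem pvEnumerate_map {α β : Type} (f : α → β) : ∀ (l : List α) (s : Int),
    PySem.List.enumerate (l.map f) s = (PySem.List.enumerate l s).map (fun p => (p.1, f p.2)) := by
  intro l
  induction l with
  | nil => intro s; simp [PySem.List.enumerate_nil]
  | cons x xs ih => intro s; simp [PySem.List.enumerate_cons, ih]

theorem pvEnumerate_range : ∀ (n : Nat),
    PySem.List.enumerate (List.range n) 0 = (List.range n).map (fun c : Nat => ((c : Int), c)) := by
  intro n
  induction n with
  | zero => simp [PySem.List.enumerate_nil]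
  | succ n ih =>
      rw [List.range_succ, PySem.List.enumerate_append, ih]
      simp [PySem.List.enumerate_cons, PySem.List.enumerate_nil]

-- A's per-column fold result and B's per-column state, as proof abbreviations
def pvColA (r0 : List Int) (rest : List (List Int)) (c : Nat) :
    List (Int × Int × Int) × Int × Int :=
  pvIdxFold pvStepA 1 (([] : List (Int × Int × Int)), (0 : Int), r0.getD c 0)
    (rest.map (fun r => r.getD c 0))

def pvColB (r0 : List Int) (rest : List (List Int)) (c : Nat) :
    Int × Int × List (Int × Int × Int) :=
  pvIdxFold (fun j v s => pvStep j s v) 1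
    ((0 : Int), r0.getD c 0, ([] : List (Int × Int × Int)))
    (rest.map (fun r => r.getD c 0))

theorem pvColB_eq (r0 : List Int) (rest : List (List Int)) (c : Nat) :
    pvColB r0 rest c
      = ((pvColA r0 rest c).2.1, (pvColA r0 rest c).2.2,
         (pvColA r0 rest c).1.filter (fun t => decide (t.2.1 > t.1))) := by
  have := pvColFold_eq (rest.map (fun r => r.getD c 0)) 1 0 (r0.getD c 0) []
  simpa [pvColB, pvColA] using this

theorem pvFcs_cons (v0 : Int) (vs : List Int) :
    find_contiguous_segments (v0 :: vs)
      = (pvIdxFold pvStepA 1 (([] : List (Int × Int × Int)), (0 : Int), v0) vs).1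
        ++ [((pvIdxFold pvStepA 1 (([] : List (Int × Int × Int)), (0 : Int), v0) vs).2.1,
             (vs.length : Int),
             (pvIdxFold pvStepA 1 (([] : List (Int × Int × Int)), (0 : Int), v0) vs).2.2)] := by
  simp only [find_contiguous_segments, PySem.List.pyGetD_zero_cons]
  rw [pvIdxFold_pyRange_tail pvStepA 0 v0 vs _]
  simp

-- ===== VERDICT (by name: the statement is the Claim_ definition above) =====
theorem find_col_groups_spec : Claim_equal_find_col_groups := by
  intro grid _ hpre
  obtain ⟨hne, hrows⟩ := hpre
  obtain ⟨r0, rest, rfl⟩ := List.exists_cons_of_ne_nil hne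
  simp only [List.headD_cons] at hrows
  show find_col_groups (r0 :: rest) = find_col_groups_alt (r0 :: rest)
  have hrow : ∀ r ∈ rest, r0.length ≤ r.length := fun r hr => hrows r (List.mem_cons_of_mem _ hr)
  -- A to flatMap over columns
  have hA : find_col_groups (r0 :: rest)
      = (List.range r0.length).flatMap (fun c =>
          (((pvColA r0 rest c).1
              ++ [((pvColA r0 rest c).2.1, (rest.length : Int), (pvColA r0 rest c).2.2)]).filter
            (fun t => decide (t.2.1 > t.1))).map
            (fun t => (t.1, (c : Int), t.2.1, t.2.2))) := by
    simp only [find_col_groups, PySem.List.pyGetD_zero_cons]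
    rw [PySem.List.pyRange_zero_nat]
    simp only [PySem.List.foldl_append_ite, PySem.List.foldl_append_eq_flatMap,
      List.nil_append, List.flatMap_map]
    refine List.flatMap_congr ?_
    intro c hc
    have hcol : (r0 :: rest).map (fun row => PySem.List.pyGetD row (c : Int) 0)
        = r0.getD c 0 :: rest.map (fun r => r.getD c 0) := by
      simp
    rw [hcol, pvFcs_cons]
    simp [pvColA]
  -- B's row-major state, per column
  have hstate :
      (PySem.List.pyRange 1 ((((r0 :: rest).length : Nat) : Int)) 1).foldl
        (fun st i => pvRowStep i (PySem.List.pyGetD (r0 :: rest) i ([] : List Int)) st)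
        ((PySem.List.pyGetD (r0 :: rest) 0 ([] : List Int)).map
          (fun v => ((0 : Int), v, ([] : List (Int × Int × Int)))))
      = (List.range r0.length).map (fun c => pvColB r0 rest c) := by
    rw [pvIdxFold_pyRange_tail pvRowStep ([] : List Int) r0 rest _]
    rw [pvZipFold rest 1 _ (by intro r' hr'; simpa using hrow r' hr')]
    simp only [PySem.List.pyGetD_zero_cons, List.length_map]
    refine List.map_congr_left ?_
    intro c hc
    have hc' : c < r0.length := List.mem_range.mp hc
    unfold pvColB
    congr 1
    simp [List.getD_eq_getElem?_getD, List.getElem?_eq_getElem (by simpa using hc' : c < (r0.map (fun v => ((0:Int), v, ([] : List (Int × Int × Int))))).length)]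
    simp [List.getElem?_eq_getElem hc']
  -- B to flatMap over columns
  have hB : find_col_groups_alt (r0 :: rest)
      = (List.range r0.length).flatMap (fun c =>
          (pvColB r0 rest c).2.2.map (fun b => (b.1, (c : Int), b.2.1, b.2.2))
            ++ (if ((rest.length : Int)) > (pvColB r0 rest c).1 then
                  [((pvColB r0 rest c).1, (c : Int), (rest.length : Int), (pvColB r0 rest c).2.1)]
                else [])) := by
    simp only [find_col_groups_alt]
    rw [hstate, pvEnumerate_map, pvEnumerate_range, List.map_map]
    simp only [PySem.List.foldl_append_eq_flatMap, List.nil_append, List.flatMap_map]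
    refine List.flatMap_congr ?_
    intro c hc
    simp [Function.comp]
  rw [hA, hB]
  refine List.flatMap_congr ?_
  intro c hc
  rw [pvColB_eq]
  simp only [List.filter_append, List.map_append, List.filter_singleton]
  congr 1
  by_cases hcond : (rest.length : Int) > (pvColA r0 rest c).2.1
  · simp [hcond]
  · simp [hcond]
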